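-- pv_equiv track=rewrite | github.com/szymonbalasz/Pybites | 272/strings.py | common_words
-- ===== SOURCE A (Python) =====
-- from typing import List
--
-- def common_words(sentence1: List[str], sentence2: List[str]) -> List[str]:
--     """
--     Input:  Two sentences - each is a  list of words in case insensitive ways.
--     Output: those common words appearing in both sentences. Capital and lowercase
--             words are treated as the same word.
--
--             If there are duplicate words in the results, just choose one word.
--             Returned words should be sorted by word's length.
--     """
--     result = []
--     sentence1 = [word.lower() for word in sentence1]
--     sentence2 = [word.lower() for word in sentence2]
--     for word in sentence1:
--         if word in sentence2 and word not in result: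
--             result.append(word)
--     return sorted(result, key=len)
-- ===== SOURCE B (Python) =====
-- from typing import List
--
-- def common_words(sentence1: List[str], sentence2: List[str]) -> List[str]:
--     words2 = {w.lower() for w in sentence2}
--     seen = set()
--     common = []
--     for word in sentence1:
--         w = word.lower()
--         if w in words2 and w not in seen:
--             seen.add(w)
--             common.append(w)
--     buckets = {}
--     for w in common:
--         buckets.setdefault(len(w), []).append(w)
--     out = []
--     for length in sorted(buckets):
--         out += buckets[length]
--     return out
-- ===== Notes on version B (the rewrite author's own statement) =====
-- stated objective: faster
-- what changed: Replaces the O(n*m) list-membership scan and the comparison sort with a hash-set membership test, a seen-set dedup pass, and a bucket (counting) sort by word length built in one pass over a length->list dict.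
import Mathlib
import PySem

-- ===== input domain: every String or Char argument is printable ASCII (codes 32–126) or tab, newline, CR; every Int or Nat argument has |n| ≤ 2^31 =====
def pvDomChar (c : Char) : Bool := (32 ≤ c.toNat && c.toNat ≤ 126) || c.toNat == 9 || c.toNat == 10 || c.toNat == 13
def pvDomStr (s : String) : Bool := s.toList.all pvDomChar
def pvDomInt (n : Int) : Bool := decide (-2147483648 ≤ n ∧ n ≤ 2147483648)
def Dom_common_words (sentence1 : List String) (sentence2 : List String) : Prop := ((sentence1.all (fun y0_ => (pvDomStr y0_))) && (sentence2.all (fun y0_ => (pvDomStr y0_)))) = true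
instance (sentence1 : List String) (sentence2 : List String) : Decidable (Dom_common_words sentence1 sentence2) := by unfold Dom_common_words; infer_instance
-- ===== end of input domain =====

-- B replaces A's O(n*m) list-membership scan and comparison sort with hash-set membership and a one-pass bucket sort by word length.


-- ===== PORT A =====
def common_words (sentence1 : List String) (sentence2 : List String) : List String :=
  let s1 := sentence1.map (fun word => PySem.Str.lower word)
  let s2 := sentence2.map (fun word => PySem.Str.lower word)
  let result := s1.foldl (fun result word =>
      if s2.contains word && !(result.contains word) then result ++ [word] else result) []
  PySem.List.sorted result (fun w => PySem.Str.len w) false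

-- ===== PORT B =====
def common_words_alt (sentence1 : List String) (sentence2 : List String) : List String :=
  let words2 : PySem.Set String := PySem.Set.ofList (sentence2.map (fun w => PySem.Str.lower w))
  -- one pass: seen set + first-occurrence list of common lowered words
  let sc := sentence1.foldl (fun (p : PySem.Set String × List String) word =>
      let w := PySem.Str.lower word
      if words2.contains w && !(PySem.Set.contains p.1 w) then (PySem.Set.add p.1 w, p.2 ++ [w])
      else p) (PySem.Set.empty, [])
  -- buckets: length -> words of that length, in order (buckets.setdefault(len(w), []).append(w))
  let buckets := sc.2.foldl
      (fun d w => PySem.Dict.modify d (PySem.Str.len w) [] (fun l => l ++ [w])) PySem.Dict.empty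
  -- concatenate buckets by ascending length
  (PySem.List.sorted (PySem.Dict.keys buckets) (fun k => k) false).foldl
      (fun out k => out ++ PySem.Dict.getD buckets k []) []

-- ===== PRECONDITION & SPEC =====
def Spec_common_words (sentence1 : List String) (sentence2 : List String) (out : List String) : Prop := out = common_words_alt sentence1 sentence2
instance (sentence1 : List String) (sentence2 : List String) (out : List String) : Decidable (Spec_common_words sentence1 sentence2 out) := by unfold Spec_common_words; infer_instance

-- ===== CLAIM (what is proved, stated in full; the proofs are below) =====
def Claim_equal_common_words : Prop := ∀ (sentence1 : List String) (sentence2 : List String), Dom_common_words sentence1 sentence2 → Spec_common_words sentence1 sentence2 (common_words sentence1 sentence2)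

-- ===== LEMMAS AND PROOFS =====

-- contains on a deduped set equals contains on the original list
lemma contains_ofList_eq (l : List String) (w : String) :
    List.contains (PySem.Set.ofList l) w = List.contains l w := by
  by_cases h : w ∈ l <;> simp [PySem.Set.mem_ofList, h]

-- B's paired (seen-set, list) fold carries twice A's result list
lemma pair_fold_eq (s2l : List String) (l : List String) :
    ∀ acc : List String,
      l.foldl (fun (p : PySem.Set String × List String) word =>
          let w := PySem.Str.lower word
          if (PySem.Set.ofList s2l).contains w && !(PySem.Set.contains p.1 w) then
            (PySem.Set.add p.1 w, p.2 ++ [w])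
          else p) (acc, acc)
      = (l.foldl (fun result word =>
            if s2l.contains (PySem.Str.lower word) && !(result.contains (PySem.Str.lower word)) then
              result ++ [PySem.Str.lower word] else result) acc,
         l.foldl (fun result word =>
            if s2l.contains (PySem.Str.lower word) && !(result.contains (PySem.Str.lower word)) then
              result ++ [PySem.Str.lower word] else result) acc) := by
  induction l with
  | nil => intro acc; rfl
  | cons word l ih =>
    intro acc
    simp only [List.foldl_cons]
    refine Eq.trans ?_ (ih _)
    congr 1
    by_cases hc : (s2l.contains (PySem.Str.lower word)
        && !(acc.contains (PySem.Str.lower word))) = true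
    · have hnc : acc.contains (PySem.Str.lower word) = false := by
        rcases Bool.and_eq_true .. |>.mp hc with ⟨_, h2⟩
        simpa using h2
      have h1 : s2l.contains (PySem.Str.lower word) = true := by
        rcases Bool.and_eq_true .. |>.mp hc with ⟨h1, _⟩; exact h1
      simp only [PySem.Set.contains, PySem.Set.add, contains_ofList_eq, hnc, h1,
        Bool.not_false, Bool.and_true, Bool.false_eq_true, if_true, if_false]
    · simp only [PySem.Set.contains, contains_ofList_eq, hc, Bool.false_eq_true, if_false]

-- insert between a prefix that refuses `before` and a suffix whose head accepts it
lemma insertBy_split {α : Type} (before : α → α → Bool) (x : α) (A B : List α)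
    (hA : ∀ a ∈ A, before x a = false) (hB : ∀ b ∈ B, before x b = true) :
    PySem.List.insertBy before x (A ++ B) = A ++ x :: B := by
  induction A with
  | nil =>
    cases B with
    | nil => rfl
    | cons b B' => simp [PySem.List.insertBy, hB b (by simp)]
  | cons a A' ih =>
    simp [PySem.List.insertBy, hA a (by simp),
      ih (fun a ha => hA a (by simp [ha])) ]

-- dropWhile (< k0) of a strictly increasing list holds only keys ≥ k0
lemma mem_dropWhile_ge (l : List Int) (hl : l.Pairwise (· < ·)) (k0 : Int) :
    ∀ b ∈ l.dropWhile (fun k => decide (k < k0)), k0 ≤ b := by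
  induction l with
  | nil => simp
  | cons a l ih =>
    intro b hb
    by_cases ha : a < k0
    · exact ih hl.tail b (by simpa [List.dropWhile, ha] using hb)
    · rw [List.dropWhile_cons_of_neg (by simpa using ha)] at hb
      rcases List.mem_cons.mp hb with rfl | hb'
      · omega
      · have := List.rel_of_pairwise_cons hl hb'
        omega

-- inserting x into the bucketed list: buckets left of key x refuse the insertion
-- test, buckets right of it accept it, so x lands at the end of its own bucket
lemma bucket_step_old {α : Type} (key : α → Int) (xs : List α) (x : α) (A B : List Int)
    (hA : ∀ k ∈ A, k < key x) (hB : ∀ b ∈ B, key x < b) :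
    PySem.List.insertBy (fun a b => decide (key a < key b)) x
        (List.flatMap (fun k => List.filter (fun y => key y == k) xs) (A ++ key x :: B))
      = List.flatMap (fun k => List.filter (fun y => key y == k) (xs ++ [x]))
          (A ++ key x :: B) := by
  have hg' : ∀ k, List.filter (fun y => key y == k) (xs ++ [x])
      = List.filter (fun y => key y == k) xs ++ (if key x == k then [x] else []) := by
    intro k
    rw [List.filter_append]
    congr 1
    cases h : key x == k <;> simp [List.filter, h]
  have hkeyg : ∀ (l : List Int), ∀ a ∈ List.flatMap (fun k => List.filter (fun y => key y == k) xs) l,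
      key a ∈ l := by
    intro l a ha
    rcases List.mem_flatMap.mp ha with ⟨k, hkl, hak⟩
    have hkey : key a = k := by simpa using (List.mem_filter.mp hak).2
    rw [hkey]; exact hkl
  rw [List.flatMap_append, List.flatMap_cons, ← List.append_assoc]
  rw [insertBy_split _ x _ _
    (by
      intro a ha
      rcases List.mem_append.mp ha with h | h
      · have := hA _ (hkeyg A a h)
        simp only [decide_eq_false_iff_not]; omega
      · have : key a = key x := by simpa using (List.mem_filter.mp h).2
        simp only [decide_eq_false_iff_not]; omega)
    (by
      intro b hb
      have := hB _ (hkeyg B b hb)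
      simp only [decide_eq_true_eq]; omega)]
  rw [List.flatMap_append, List.flatMap_cons]
  rw [List.flatMap_congr (f := fun k => List.filter (fun y => key y == k) (xs ++ [x]))
    (g := fun k => List.filter (fun y => key y == k) xs) (l := A) (by
    intro k hk
    show List.filter (fun y => key y == k) (xs ++ [x]) = List.filter (fun y => key y == k) xs
    rw [hg', if_neg (by have := hA k hk; simp only [beq_iff_eq]; omega), List.append_nil])]
  rw [List.flatMap_congr (f := fun k => List.filter (fun y => key y == k) (xs ++ [x]))
    (g := fun k => List.filter (fun y => key y == k) xs) (l := B) (by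
    intro k hk
    show List.filter (fun y => key y == k) (xs ++ [x]) = List.filter (fun y => key y == k) xs
    rw [hg', if_neg (by have := hB k hk; simp only [beq_iff_eq]; omega), List.append_nil])]
  rw [hg' (key x), if_pos (by simp)]
  simp [List.append_assoc]

-- inserting x whose key is new: it becomes a fresh singleton bucket between A and B
lemma bucket_step_new {α : Type} (key : α → Int) (xs : List α) (x : α) (A B : List Int)
    (hA : ∀ k ∈ A, k < key x) (hB : ∀ b ∈ B, key x < b) (hnew : key x ∉ xs.map key) :
    PySem.List.insertBy (fun a b => decide (key a < key b)) x
        (List.flatMap (fun k => List.filter (fun y => key y == k) xs) (A ++ B))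
      = List.flatMap (fun k => List.filter (fun y => key y == k) (xs ++ [x]))
          (A ++ key x :: B) := by
  have hgk0 : List.filter (fun y => key y == key x) xs = [] := by
    rw [List.filter_eq_nil_iff]
    intro y hy hkey
    have : key y = key x := by simpa using hkey
    exact hnew (this ▸ List.mem_map_of_mem hy)
  have h1 : PySem.List.insertBy (fun a b => decide (key a < key b)) x
        (List.flatMap (fun k => List.filter (fun y => key y == k) xs) (A ++ key x :: B))
      = PySem.List.insertBy (fun a b => decide (key a < key b)) x
        (List.flatMap (fun k => List.filter (fun y => key y == k) xs) (A ++ B)) := by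
    rw [List.flatMap_append, List.flatMap_append, List.flatMap_cons, hgk0]
    simp
  rw [← h1]
  exact bucket_step_old key xs x A B hA hB

-- the bucket theorem: a stable sort by key is the concatenation, over the distinct
-- keys in ascending order, of the key-filtered sublists
lemma sorted_eq_flatMap_buckets {α : Type} (key : α → Int) (xs : List α) :
    PySem.List.sorted xs key false =
      (PySem.List.sorted (PySem.Set.ofList (xs.map key)) (fun k => k) false).flatMap
        (fun k => xs.filter (fun x => key x == k)) := by
  induction xs using List.reverseRecOn with
  | nil => rfl
  | append_singleton xs x ih =>
    have hks : (PySem.List.sorted (PySem.Set.ofList (xs.map key)) (fun k => k) false).Pairwise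
        (· < ·) := PySem.List.sorted_ofList_pairwise_lt _
    obtain ⟨A, B, hAB, hA, hBge, hBpair⟩ :
        ∃ A B, A ++ B = PySem.List.sorted (PySem.Set.ofList (xs.map key)) (fun k => k) false
          ∧ (∀ k ∈ A, k < key x) ∧ (∀ b ∈ B, key x ≤ b) ∧ B.Pairwise (· < ·) :=
      ⟨_, _, List.takeWhile_append_dropWhile,
        fun k hk => by simpa using List.mem_takeWhile_imp hk,
        mem_dropWhile_ge _ hks (key x),
        hks.sublist (List.dropWhile_sublist _)⟩
    have hL : PySem.List.sorted (xs ++ [x]) key false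
        = PySem.List.insertBy (fun a b => decide (key a < key b)) x
            (PySem.List.sorted xs key false) := by
      rw [PySem.List.sorted_eq_foldl_insertBy, PySem.List.sorted_eq_foldl_insertBy,
        List.foldl_append]
      rfl
    have hSnew : PySem.Set.ofList ((xs ++ [x]).map key)
        = PySem.Set.add (PySem.Set.ofList (xs.map key)) (key x) := by
      rw [List.map_append, PySem.Set.ofList_eq_foldl, List.foldl_append,
        ← PySem.Set.ofList_eq_foldl]
      simp [List.foldl]
    by_cases hk0 : key x ∈ PySem.List.sorted (PySem.Set.ofList (xs.map key)) (fun k => k) false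
    · -- the key is already present: same key list, x goes to the end of its bucket
      have hk0S : key x ∈ PySem.Set.ofList (xs.map key) :=
        (PySem.List.mem_sorted _ _ _ _).mp hk0
      have hadd : PySem.Set.add (PySem.Set.ofList (xs.map key)) (key x)
          = PySem.Set.ofList (xs.map key) := by
        have hc : List.contains (PySem.Set.ofList (xs.map key)) (key x) = true :=
          List.elem_eq_true_of_mem hk0S
        simp only [PySem.Set.add, PySem.Set.contains, hc]
        simp
      have hk0B : key x ∈ B := by
        rcases List.mem_append.mp (hAB ▸ hk0) with h | h
        · exact absurd (hA _ h) (lt_irrefl _)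
        · exact h
      obtain ⟨B', hBeq⟩ : ∃ B', B = key x :: B' := by
        cases B with
        | nil => cases hk0B
        | cons b0 B' =>
          have hb0 : b0 = key x := by
            rcases List.mem_cons.mp hk0B with h | h
            · omega
            · have h1 := List.rel_of_pairwise_cons hBpair h
              have h2 := hBge b0 (List.mem_cons_self ..)
              omega
          exact ⟨B', by rw [hb0]⟩
      have hB' : ∀ b ∈ B', key x < b := by
        intro b hb
        have := List.rel_of_pairwise_cons (hBeq ▸ hBpair) hb
        omega
      rw [hL, ih, hSnew, hadd, ← hAB, hBeq]
      exact bucket_step_old key xs x A B' hA hB'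
    · -- a genuinely new key: it gets its own singleton bucket between A and B
      have hk0S : key x ∉ PySem.Set.ofList (xs.map key) :=
        fun h => hk0 ((PySem.List.mem_sorted _ _ _ _).mpr h)
      have hadd : PySem.Set.add (PySem.Set.ofList (xs.map key)) (key x)
          = PySem.Set.ofList (xs.map key) ++ [key x] := by
        simp [PySem.Set.add, List.contains_eq_mem, hk0S]
      have hBgt : ∀ b ∈ B, key x < b := by
        intro b hb
        have h1 := hBge b hb
        have h2 : b ≠ key x := by
          rintro rfl
          exact hk0 (hAB ▸ List.mem_append_right A hb)
        omega
      have hsorted' : PySem.List.sorted (PySem.Set.ofList (xs.map key) ++ [key x])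
          (fun k => k) false = A ++ key x :: B := by
        apply PySem.List.sorted_eq_of_perm_of_pairwise_lt
        · refine List.perm_middle.trans ?_
          rw [hAB]
          exact ((PySem.List.sorted_perm _ _ _).cons (key x)).trans
            (List.perm_append_singleton (key x) _).symm
        · rw [List.pairwise_append]
          refine ⟨hks.sublist (hAB ▸ (A.sublist_append_left B)), 
            List.pairwise_cons.mpr ⟨hBgt, hBpair⟩, ?_⟩
          intro a ha b hb
          have h1 := hA a ha
          rcases List.mem_cons.mp hb with rfl | h
          · exact h1
          · have := hBge b h; omega
      have hnew : key x ∉ xs.map key := fun h => hk0S ((PySem.Set.mem_ofList _ _).mpr h)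
      rw [hL, ih, hSnew, hadd, hsorted', ← hAB]
      exact bucket_step_new key xs x A B hA hBgt hnew

-- B's bucket dict: lookup gives the length-k bucket, keys are the distinct lengths
lemma getD_bucket (r : List String) (k : Int) :
    (r.foldl (fun d w => PySem.Dict.modify d (PySem.Str.len w) [] (fun l => l ++ [w]))
        PySem.Dict.empty).getD k []
      = r.filter (fun w => PySem.Str.len w == k) := by
  have h := PySem.Dict.getD_foldl_modify_append
    (r.map (fun w => (PySem.Str.len w, w))) PySem.Dict.empty k
  rw [List.foldl_map] at h
  simpa [List.filter_map, Function.comp_def] using h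

lemma keys_bucket (r : List String) :
    (r.foldl (fun d w => PySem.Dict.modify d (PySem.Str.len w) [] (fun l => l ++ [w]))
        PySem.Dict.empty).keys
      = PySem.Set.ofList (r.map (fun w => PySem.Str.len w)) := by
  rw [PySem.Dict.keys_foldl_modify_key]
  exact PySem.Set.update_empty _

-- ===== VERDICT (by name: the statement is the Claim_ definition above) =====
theorem common_words_spec : Claim_equal_common_words := by
  intro s1 s2 _
  unfold Spec_common_words
  simp only [common_words, common_words_alt]
  rw [List.foldl_map]
  rw [show ((PySem.Set.empty : PySem.Set String), ([] : List String))
      = (([] : List String), ([] : List String)) from rfl]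
  rw [pair_fold_eq]
  set r := s1.foldl (fun result word =>
      if ((s2.map (fun w => PySem.Str.lower w)).contains (PySem.Str.lower word)
          && !result.contains (PySem.Str.lower word)) = true then
        result ++ [PySem.Str.lower word] else result) [] with hrdef
  rw [keys_bucket]
  rw [PySem.List.foldl_append_eq_flatMap, List.nil_append]
  rw [List.flatMap_congr (fun k _ => getD_bucket r k)]
  exact sorted_eq_flatMap_buckets (fun w => PySem.Str.len w) r
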